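-- pv_equiv track=rewrite | github.com/tonyrkovar/Graphs | projects/ancestor/ancestor.py | get_earliest
-- ===== SOURCE A (Python) =====
-- def get_earliest(ancestors):
--     is_earliest = set()
--     for person in ancestors:
--         is_earliest.add(person[0])
--     for person in ancestors:
--         if person[1] in is_earliest:
--             is_earliest.remove(person[1])
--     return is_earliest
-- ===== SOURCE B (Python) =====
-- def get_earliest(ancestors):
--     return {p for p, _ in ancestors if all(c != p for _, c in ancestors)}
-- ===== Notes on version B (the rewrite author's own statement) =====
-- stated objective: simpler
-- what changed: B is a single set comprehension that keeps a parent only if an inner scan finds it in no child position (filter-before-insert, nested scan), instead of A's two staged loops that build a parent set and then conditionally remove children from it.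
import Mathlib
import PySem

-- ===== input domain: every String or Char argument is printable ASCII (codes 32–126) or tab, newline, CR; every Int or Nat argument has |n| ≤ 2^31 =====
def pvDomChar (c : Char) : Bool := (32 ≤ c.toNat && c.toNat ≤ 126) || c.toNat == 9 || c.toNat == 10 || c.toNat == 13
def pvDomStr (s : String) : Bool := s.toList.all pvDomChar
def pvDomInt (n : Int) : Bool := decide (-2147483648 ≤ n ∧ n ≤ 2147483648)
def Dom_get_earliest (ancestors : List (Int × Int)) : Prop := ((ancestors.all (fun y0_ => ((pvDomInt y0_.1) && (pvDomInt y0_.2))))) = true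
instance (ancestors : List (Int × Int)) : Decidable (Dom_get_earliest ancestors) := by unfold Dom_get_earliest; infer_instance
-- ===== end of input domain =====

-- B is one filter-before-insert comprehension with an inner child scan, instead of A's build-then-remove staged loops (objective: simpler).
-- ===== PORT A =====
def get_earliest (ancestors : List (Int × Int)) : List Int :=
  let is_earliest : PySem.Set Int :=
    ancestors.foldl (fun s person => PySem.Set.add s person.1) PySem.Set.empty
  ancestors.foldl
    (fun s person =>
      if PySem.Set.contains s person.2 then PySem.Set.discard s person.2 else s)
    is_earliest

-- ===== PORT B =====
def get_earliest_alt (ancestors : List (Int × Int)) : List Int :=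
  ancestors.foldl
    (fun s person =>
      if ancestors.all (fun q => !(q.2 == person.1)) then PySem.Set.add s person.1 else s)
    PySem.Set.empty

-- ===== PRECONDITION & SPEC =====
def Spec_get_earliest (ancestors : List (Int × Int)) (out : List Int) : Prop := out = get_earliest_alt ancestors
instance (ancestors : List (Int × Int)) (out : List Int) : Decidable (Spec_get_earliest ancestors out) := by unfold Spec_get_earliest; infer_instance

-- ===== CLAIM =====
def Claim_equal_get_earliest : Prop := ∀ (ancestors : List (Int × Int)), Dom_get_earliest ancestors → Spec_get_earliest ancestors (get_earliest ancestors)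

-- ===== LEMMAS AND PROOFS =====

-- A's conditional-removal loop over the pairs filters out every second component seen.
theorem removal_loop_eq_filter (l : List (Int × Int)) (s : List Int) :
    l.foldl
      (fun s person =>
        if PySem.Set.contains s person.2 then PySem.Set.discard s person.2 else s)
      s
    = s.filter (fun x => !(l.map Prod.snd).contains x) := by
  induction l generalizing s with
  | nil => simp
  | cons p t ih =>
    have hstep :
        (if PySem.Set.contains s p.2 then PySem.Set.discard s p.2 else s)
          = s.filter (fun y => !(y == p.2)) := by
      simp only [PySem.Set.contains, PySem.Set.discard, List.contains_eq_mem]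
      by_cases h : p.2 ∈ s
      · simp [h]
      · rw [if_neg (by simpa using h)]
        refine (List.filter_eq_self.mpr ?_).symm
        intro a ha
        simp only [Bool.not_eq_true', beq_eq_false_iff_ne]
        exact fun hc => h (hc ▸ ha)
    simp only [List.foldl_cons, hstep, ih, List.filter_filter, List.map_cons,
      List.contains_cons]
    congr 1
    funext x
    cases x == p.2 <;> simp

-- A's first loop is exactly set(map fst).
theorem add_loop_eq_ofList (l : List (Int × Int)) :
    l.foldl (fun s person => PySem.Set.add s person.1) PySem.Set.empty
      = PySem.Set.ofList (l.map Prod.fst) := by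
  simp [PySem.Set.ofList_eq_foldl, List.foldl_map]

-- filtering commutes with set-building (the predicate depends only on the element).
theorem filter_foldl_add (l : List Int) (s : List Int) (q : Int → Bool) :
    (l.foldl PySem.Set.add s).filter q = (l.filter q).foldl PySem.Set.add (s.filter q) := by
  induction l generalizing s with
  | nil => simp
  | cons x t ih =>
    simp only [List.foldl_cons]
    rw [ih]
    by_cases hq : q x = true
    · have hadd : List.filter q (PySem.Set.add s x) = PySem.Set.add (List.filter q s) x := by
        simp only [PySem.Set.add, PySem.Set.contains, List.contains_eq_mem]
        by_cases hm : x ∈ s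
        · simp [hm, List.mem_filter, hq]
        · rw [if_neg (by simpa using hm),
            if_neg (by simp [List.mem_filter]; intro h; exact absurd h hm),
            List.filter_append]
          simp [hq]
      simp [hq, hadd]
    · simp only [Bool.not_eq_true] at hq
      have hadd : List.filter q (PySem.Set.add s x) = List.filter q s := by
        simp only [PySem.Set.add, PySem.Set.contains]
        split
        · rfl
        · rw [List.filter_append]; simp [hq]
      simp [hq, hadd]

-- B's conditional-add loop builds set(filtered parents).
theorem cond_add_loop_eq (l : List (Int × Int)) (c : Int → Bool) (s : List Int) :
    l.foldl (fun s person => if c person.1 then PySem.Set.add s person.1 else s) s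
      = ((l.map Prod.fst).filter c).foldl PySem.Set.add s := by
  induction l generalizing s with
  | nil => rfl
  | cons p t ih =>
    simp only [List.foldl_cons, List.map_cons, List.filter_cons]
    by_cases h : c p.1 = true
    · simp [h, ih]
    · simp only [Bool.not_eq_true] at h; simp [h, ih]

-- the inner all-scan is exactly non-membership in the children list.
theorem all_scan_eq_not_contains (l : List (Int × Int)) (x : Int) :
    l.all (fun q => !(q.2 == x)) = !(l.map Prod.snd).contains x := by
  rw [Bool.eq_iff_iff]
  simp [List.all_eq_true, List.contains_eq_mem]
  constructor
  · intro h y hy; exact h y x hy rfl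
  · intro h a b hab hbx; subst hbx; exact h a hab

-- ===== VERDICT =====
theorem get_earliest_spec : Claim_equal_get_earliest := by
  intro ancestors _
  unfold Spec_get_earliest get_earliest get_earliest_alt
  simp only [add_loop_eq_ofList, removal_loop_eq_filter]
  have hB := cond_add_loop_eq ancestors
      (fun x => ancestors.all (fun q => !(q.2 == x))) PySem.Set.empty
  simp only at hB
  rw [hB]
  have : (fun x => ancestors.all (fun q => !(q.2 == x)))
      = (fun x => !(ancestors.map Prod.snd).contains x) := by
    funext x; exact all_scan_eq_not_contains ancestors x
  rw [this, PySem.Set.ofList_eq_foldl, filter_foldl_add]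
  rfl
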